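-- pv_equiv track=rewrite | github.com/PaulGehin/advent-of-code | 2015/11.py | increasing_straight
-- ===== SOURCE A (Python) =====
-- def next_letter(letter):
--     return "a" if letter == "z" else chr(ord(letter) + 1)
--
-- def increasing_straight(word):
--     if len(word) < 3:
--         return False
--     else:
--         first = word[0]
--         second = next_letter(first)
--         third = next_letter(second)
--         return ord(first) < ord("y") and second == word[1] and third == word[2] or increasing_straight(word[1:])
-- ===== SOURCE B (Python) =====
-- def increasing_straight(word):
--     return any(ord(a) < ord("y") and ord(b) == ord(a) + 1 and ord(c) == ord(b) + 1
--                for a, b, c in zip(word, word[1:], word[2:]))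
-- ===== Notes on version B (the rewrite author's own statement) =====
-- stated objective: faster
-- what changed: Replaced the recursion that re-slices the string at every step with a single linear scan over consecutive character triples (zip of the string with its two shifts), comparing char codes directly instead of building successor characters.
import Mathlib
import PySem

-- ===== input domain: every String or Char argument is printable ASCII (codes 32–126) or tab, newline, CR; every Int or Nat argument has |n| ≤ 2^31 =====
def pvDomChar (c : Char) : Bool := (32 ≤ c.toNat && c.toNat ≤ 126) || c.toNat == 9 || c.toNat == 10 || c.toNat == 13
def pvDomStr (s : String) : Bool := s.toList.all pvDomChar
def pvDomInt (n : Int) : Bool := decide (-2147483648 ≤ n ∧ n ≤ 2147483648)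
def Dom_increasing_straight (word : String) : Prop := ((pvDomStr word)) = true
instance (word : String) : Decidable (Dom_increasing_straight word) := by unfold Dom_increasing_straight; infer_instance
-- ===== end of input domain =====

-- B replaces A's quadratic slice-and-recurse with one linear scan over consecutive
-- character triples; proved to return the same Bool on every string in the domain.


-- ===== PORT A =====
-- next_letter(letter): "a" if letter == "z" else chr(ord(letter) + 1)
def pvNextLetter (c : Char) : Char := if c == 'z' then 'a' else Char.ofNat (c.toNat + 1)

-- the recursion of A over the character list (word[0], word[1], word[2], word[1:])
def pvGoA : List Char → Bool
  | c1 :: c2 :: c3 :: rest =>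
      (decide (c1.toNat < 'y'.toNat) && (pvNextLetter c1 == c2)
        && (pvNextLetter (pvNextLetter c1) == c3))
      || pvGoA (c2 :: c3 :: rest)
  | _ => false

def increasing_straight (word : String) : Bool := pvGoA word.toList

-- ===== PORT B =====
-- the per-triple test of Source B: ord(a) < ord("y") and ord(b) == ord(a)+1 and ord(c) == ord(b)+1
def pvTriple (a b c : Char) : Bool :=
  decide (a.toNat < 121) && decide (b.toNat = a.toNat + 1) && decide (c.toNat = b.toNat + 1)

def increasing_straight_alt (word : String) : Bool :=
  let cs := word.toList
  (cs.zip (cs.tail.zip cs.tail.tail)).any fun t => pvTriple t.1 t.2.1 t.2.2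

-- ===== PRECONDITION & SPEC =====
def Spec_increasing_straight (word : String) (out : Bool) : Prop := out = increasing_straight_alt word
instance (word : String) (out : Bool) : Decidable (Spec_increasing_straight word out) := by unfold Spec_increasing_straight; infer_instance

-- ===== CLAIM (what is proved, stated in full; the proofs are below) =====
def Claim_equal_increasing_straight : Prop := ∀ (word : String), Dom_increasing_straight word → Spec_increasing_straight word (increasing_straight word)

-- ===== LEMMAS AND PROOFS =====

theorem pvCharEq (a b : Char) : (a == b) = decide (a.toNat = b.toNat) := by
  by_cases h : a.toNat = b.toNat
  · rw [decide_eq_true h, beq_iff_eq]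
    exact Char.ext (UInt32.toNat_inj.mp h)
  · rw [decide_eq_false h, beq_eq_false_iff_ne]
    intro he; exact h (congrArg Char.toNat he)

theorem pvOfNat_toNat (n : Nat) (h : n < 0xD800) : (Char.ofNat n).toNat = n := by
  rw [Char.toNat_ofNat, if_pos (Or.inl h)]

-- A's head test equals B's head test on any three characters.
theorem pvHead_eq (a b c : Char) :
    (decide (a.toNat < 'y'.toNat) && (pvNextLetter a == b)
       && (pvNextLetter (pvNextLetter a) == c)) = pvTriple a b c := by
  have hy : 'y'.toNat = 121 := by decide
  have hz : 'z'.toNat = 122 := by decide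
  by_cases ha : a.toNat < 121
  · have haz : (a == 'z') = false := by
      rw [pvCharEq, hz]; exact decide_eq_false (by omega)
    have n1 : pvNextLetter a = Char.ofNat (a.toNat + 1) := by
      unfold pvNextLetter; rw [haz]; rfl
    have t1 : (Char.ofNat (a.toNat + 1)).toNat = a.toNat + 1 := pvOfNat_toNat _ (by omega)
    have e2 : (pvNextLetter a == b) = decide (b.toNat = a.toNat + 1) := by
      rw [n1, pvCharEq, t1]; exact decide_eq_decide.mpr (by omega)
    have n2 : pvNextLetter (pvNextLetter a) = Char.ofNat (a.toNat + 1 + 1) := by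
      rw [n1]; unfold pvNextLetter
      rw [pvCharEq, t1, hz, decide_eq_false (by omega : ¬ a.toNat + 1 = 122)]
      simp
    have t2 : (Char.ofNat (a.toNat + 1 + 1)).toNat = a.toNat + 1 + 1 :=
      pvOfNat_toNat _ (by omega)
    have e3 : (pvNextLetter (pvNextLetter a) == c) = decide (c.toNat = a.toNat + 2) := by
      rw [n2, pvCharEq, t2]; exact decide_eq_decide.mpr (by omega)
    rw [e2, e3, hy]
    unfold pvTriple
    by_cases hb : b.toNat = a.toNat + 1
    · rw [decide_eq_decide.mpr (by omega : c.toNat = a.toNat + 2 ↔ c.toNat = b.toNat + 1)]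
    · rw [decide_eq_false hb]; simp
  · unfold pvTriple
    rw [hy, decide_eq_false ha]; simp

theorem pvGoA_eq_zip (l : List Char) :
    pvGoA l = (l.zip (l.tail.zip l.tail.tail)).any fun t => pvTriple t.1 t.2.1 t.2.2 := by
  induction l with
  | nil => simp [pvGoA]
  | cons a t ih =>
    match t with
    | [] => simp [pvGoA]
    | [b] => simp [pvGoA]
    | b :: c :: r =>
      simp only [pvGoA, List.tail_cons, List.zip_cons_cons, List.any_cons]
      rw [pvHead_eq, ih]
      simp

-- ===== VERDICT (by name: the statement is the Claim_ definition above) =====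
theorem increasing_straight_spec : Claim_equal_increasing_straight := by
  intro word _
  unfold Spec_increasing_straight increasing_straight increasing_straight_alt
  exact pvGoA_eq_zip word.toList
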